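-- pv_equiv track=rewrite | github.com/JavierCastroMagro03/Algorithms-Python | Ejercicios/Solución_Examen_Parcial/Code/Comprar_Juegos_Japon.py | metodo
-- ===== SOURCE A (Python) =====
-- from collections import deque
--
-- def recorridoanchura(juego, grafo, visitados, juegos, tipoJ):
--     visitados.add(juego)
--     cola = deque()
--     cola.append(juego)
--     ElemCConexa = 1  # lo inicializamos con el primer juego que me interese y esta variable me guarda el número de elementos de la componente conexa
--
--     while cola:  # Mientras queden elementos en la cola
--         aux = cola.popleft()  # Sacamos el primer elemento de la cola
--         for adj in grafo[aux]:  # Por cada adyacente al juego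
--             if adj not in visitados:   # Se comprueba si está en el conjunto de visitados y si es del tipo que nos interesa
--                 visitados.add(adj)  # Lo añadimos al conjunto de visitados
--                 cola.append(adj)  # Lo añadimos a la cola
--                 if juegos[adj] == tipoJ:
--                     ElemCConexa += 1  # Incrementamos el número de elementos visitados en esa componente conexa
--
--     return ElemCConexa
--
-- def metodo(grafo, juegos, nJuegos, tipoJ):
--     opciones = 0  # Variable para almacenar el número de componentes conexas
--     juegosComprados = 0  # Variable que almacena el max número de juegos que compro de un tipo concreto de una componente conexa
--     visitados = set()  # Conjunto de visitados
--
--     for juego in range(int(nJuegos)):  # Por cada juego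
--         if juego not in visitados:  # Si no está en el conjunto de visitados y es del tipo que me interesa
--             ElemCConexa = recorridoanchura(juego, grafo, visitados, juegos, tipoJ)  # Llamada al recorrido en anchura
--             # Esto se ejecuta por cada componente conexa
--             opciones += 1  # Acumulamos componentes conexas
--             if ElemCConexa > juegosComprados:
--                 juegosComprados = ElemCConexa
--
--     return opciones, juegosComprados
-- ===== SOURCE B (Python) =====
-- def metodo(grafo, juegos, nJuegos, tipoJ):
--     # Saturation (fixpoint) component computation instead of queue-BFS; counts tallied per component afterwards.
--     visitados = set()
--     counts = []
--     for juego in range(int(nJuegos)):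
--         if juego in visitados:
--             continue
--         comp = {juego}
--         while True:
--             nuevos = {adj for u in comp for adj in grafo[u]} - visitados - comp
--             if not nuevos:
--                 break
--             comp |= nuevos
--         visitados |= comp
--         counts.append(1 + sum(1 for v in comp if v != juego and juegos[v] == tipoJ))
--     return len(counts), (max(counts) if counts else 0)
-- ===== Notes on version B (the rewrite author's own statement) =====
-- stated objective: alternative
-- what changed: Replaces the per-start incremental queue-BFS (deque with an in-flight match counter) by a fixpoint saturation that grows each component with whole-set image/difference operations and tallies the purchase count per finished component afterwards.
-- outside the precondition, e.g. on metodo({0: [5], 5: []}, {5: 'x'}, 1, 'x'): A returns (1, 2), B returns (1, 2); on metodo({0: [1], 1: [0]}, {1: 'a'}, 2, 'a'): A returns (1, 2), B returns (1, 2)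
import Mathlib
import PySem

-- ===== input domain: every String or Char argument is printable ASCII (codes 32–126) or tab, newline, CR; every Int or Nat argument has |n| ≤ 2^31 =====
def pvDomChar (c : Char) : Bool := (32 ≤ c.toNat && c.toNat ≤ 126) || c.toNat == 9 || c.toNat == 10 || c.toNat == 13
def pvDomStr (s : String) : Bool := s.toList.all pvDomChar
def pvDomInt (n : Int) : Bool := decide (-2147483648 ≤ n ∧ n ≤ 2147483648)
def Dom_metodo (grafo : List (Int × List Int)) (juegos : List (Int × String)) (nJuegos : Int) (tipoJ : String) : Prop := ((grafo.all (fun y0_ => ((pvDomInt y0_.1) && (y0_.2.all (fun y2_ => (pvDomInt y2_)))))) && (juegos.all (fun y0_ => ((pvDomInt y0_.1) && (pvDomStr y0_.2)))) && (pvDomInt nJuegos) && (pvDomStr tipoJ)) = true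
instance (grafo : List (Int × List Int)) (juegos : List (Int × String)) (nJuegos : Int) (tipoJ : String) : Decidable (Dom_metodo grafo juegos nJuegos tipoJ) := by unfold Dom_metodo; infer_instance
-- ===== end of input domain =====

-- B replaces A's incremental queue-BFS by a fixpoint saturation of each component,
-- tallying the purchase count per finished component; objective: alternative decomposition.

-- ===== PORT A =====
-- dict lookup (first match), total with a default: Python raises KeyError where the key
-- is absent — those inputs are excluded by Pre_metodo below.
def adjOf (grafo : List (Int × List Int)) (u : Int) : List Int :=
  (((grafo.find? (fun p => p.1 == u)).map Prod.snd).getD [])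

def tipoOf (juegos : List (Int × String)) (v : Int) : String :=
  (((juegos.find? (fun p => p.1 == v)).map Prod.snd).getD "")

-- total number of adjacency entries: an upper bound (plus slack) on BFS dequeues / saturation rounds
def fuelOf (grafo : List (Int × List Int)) : Nat :=
  2 + (grafo.map (fun p => p.2.length)).sum

-- the while-loop of recorridoanchura: pop from the front, fold the adjacency list
-- updating (visitados, queue, ElemCConexa) exactly as the Python for-loop does
def bfsLoop (grafo : List (Int × List Int)) (juegos : List (Int × String)) (tipoJ : String) :
    Nat → List Int → PySem.Set Int → Int → PySem.Set Int × Int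
  | 0, _, vis, e => (vis, e)
  | fuel+1, cola, vis, e =>
    match cola with
    | [] => (vis, e)
    | aux :: rest =>
      let st := (adjOf grafo aux).foldl
        (fun (st : PySem.Set Int × List Int × Int) adj =>
          if adj ∈ st.1 then st
          else (PySem.Set.add st.1 adj, st.2.1 ++ [adj],
                if tipoOf juegos adj == tipoJ then st.2.2 + 1 else st.2.2))
        (vis, rest, e)
      bfsLoop grafo juegos tipoJ fuel st.2.1 st.1 st.2.2

def recorridoanchura (juego : Int) (grafo : List (Int × List Int))
    (visitados : PySem.Set Int) (juegos : List (Int × String)) (tipoJ : String) :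
    PySem.Set Int × Int :=
  bfsLoop grafo juegos tipoJ (fuelOf grafo) [juego] (PySem.Set.add visitados juego) 1

def metodo (grafo : List (Int × List Int)) (juegos : List (Int × String)) (nJuegos : Int) (tipoJ : String) : Int × Int :=
  let st := (PySem.List.pyRange 0 nJuegos 1).foldl
    (fun (st : Int × Int × PySem.Set Int) juego =>
      if juego ∈ st.2.2 then st
      else
        let r := recorridoanchura juego grafo st.2.2 juegos tipoJ
        (st.1 + 1, if r.2 > st.2.1 then r.2 else st.2.1, r.1))
    (0, 0, PySem.Set.empty)
  (st.1, st.2.1)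

-- ===== PORT B =====
-- nuevos = {adj for u in comp for adj in grafo[u]} - visitados - comp
def nuevosOf (grafo : List (Int × List Int)) (visitados comp : PySem.Set Int) : PySem.Set Int :=
  PySem.Set.diff (PySem.Set.diff (PySem.Set.ofList (comp.flatMap (adjOf grafo))) visitados) comp

-- the 'while True' saturation loop of B
def satLoop (grafo : List (Int × List Int)) (visitados : PySem.Set Int) :
    Nat → PySem.Set Int → PySem.Set Int
  | 0, comp => comp
  | fuel+1, comp =>
    let nuevos := nuevosOf grafo visitados comp
    if nuevos.isEmpty then comp
    else satLoop grafo visitados fuel (PySem.Set.union comp nuevos)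

def compCount (juegos : List (Int × String)) (tipoJ : String) (juego : Int)
    (comp : PySem.Set Int) : Int :=
  1 + (comp.map (fun v => if v ≠ juego ∧ tipoOf juegos v = tipoJ then (1 : Int) else 0)).sum

def metodo_alt (grafo : List (Int × List Int)) (juegos : List (Int × String)) (nJuegos : Int) (tipoJ : String) : Int × Int :=
  let st := (PySem.List.pyRange 0 nJuegos 1).foldl
    (fun (st : PySem.Set Int × List Int) juego =>
      if juego ∈ st.1 then st
      else
        let comp := satLoop grafo st.1 (fuelOf grafo) (PySem.Set.add PySem.Set.empty juego)
        (PySem.Set.union st.1 comp, st.2 ++ [compCount juegos tipoJ juego comp]))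
    (PySem.Set.empty, [])
  (st.2.length, match st.2 with | [] => 0 | c :: cs => cs.foldl max c)

-- ===== PRECONDITION & SPEC =====
-- Pre_metodo excludes exactly the KeyError inputs of A and, being closed-form rather than a
-- reachability re-simulation, additionally requires every listed neighbour of an in-range node
-- to be in range with a juegos entry (a slight narrowing: A can return when an unconsulted
-- key is missing or a neighbour is out of range — see cites; B agrees with A there too).
-- (the quantifier's range is capped at grafo.length so the predicate is cheap to decide for any
-- nJuegos; under the first conjunct — itself forced by needing nJuegos distinct in-range keys —
-- the cap is nJuegos itself, so the quantifier still runs over exactly range(nJuegos))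
def Pre_metodo (grafo : List (Int × List Int)) (juegos : List (Int × String)) (nJuegos : Int) (tipoJ : String) : Prop :=
  nJuegos ≤ (grafo.length : Int) ∧
  ∀ k ∈ PySem.List.pyRange 0 (min nJuegos (grafo.length : Int)) 1,
    (grafo.find? (fun p => p.1 == k)).isSome ∧
    ∀ v ∈ adjOf grafo k, 0 ≤ v ∧ v < nJuegos ∧ (juegos.find? (fun p => p.1 == v)).isSome
instance (grafo : List (Int × List Int)) (juegos : List (Int × String)) (nJuegos : Int) (tipoJ : String) : Decidable (Pre_metodo grafo juegos nJuegos tipoJ) := by unfold Pre_metodo; infer_instance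

def pvWitness_metodo : (List (Int × List Int)) × (List (Int × String)) × Int × String :=
  ([(0, [1]), (1, [0]), (2, [])], [(0, "rpg"), (1, "rpg"), (2, "sim")], 3, "rpg")

def Spec_metodo (grafo : List (Int × List Int)) (juegos : List (Int × String)) (nJuegos : Int) (tipoJ : String) (out : Int × Int) : Prop := out = metodo_alt grafo juegos nJuegos tipoJ
instance (grafo : List (Int × List Int)) (juegos : List (Int × String)) (nJuegos : Int) (tipoJ : String) (out : Int × Int) : Decidable (Spec_metodo grafo juegos nJuegos tipoJ out) := by unfold Spec_metodo; infer_instance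

-- ===== CLAIM (what is proved, stated in full; the proofs are below) =====
def Claim_equal_metodo : Prop := ∀ (grafo : List (Int × List Int)) (juegos : List (Int × String)) (nJuegos : Int) (tipoJ : String), Dom_metodo grafo juegos nJuegos tipoJ → Pre_metodo grafo juegos nJuegos tipoJ → Spec_metodo grafo juegos nJuegos tipoJ (metodo grafo juegos nJuegos tipoJ)

-- ===== LEMMAS AND PROOFS =====

-- all adjacency entries of the graph (with multiplicity)
def cands (grafo : List (Int × List Int)) : List Int := (grafo.map Prod.snd).flatten

-- count of type matches in a list of newly visited nodes (A's increments)
def cntA (juegos : List (Int × String)) (tipoJ : String) (l : List Int) : Int :=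
  ((l.filter (fun v => tipoOf juegos v == tipoJ)).length : Int)

-- nodes reachable from s through nodes outside P (the set both traversals add)
inductive Reach (grafo : List (Int × List Int)) (P : Int → Prop) (s : Int) : Int → Prop
  | base : Reach grafo P s s
  | step {u v : Int} : Reach grafo P s u → v ∈ adjOf grafo u → ¬ P v → Reach grafo P s v

theorem reach_congr {g : List (Int × List Int)} {P Q : Int → Prop} {s x : Int}
    (h : ∀ y, P y ↔ Q y) (hr : Reach g P s x) : Reach g Q s x := by
  induction hr with
  | base => exact Reach.base
  | step hu hadj hnp ih => exact Reach.step ih hadj (fun hq => hnp ((h _).mpr hq))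

theorem reach_not_P {g : List (Int × List Int)} {P : Int → Prop} {s x : Int}
    (hs : ¬ P s) (hr : Reach g P s x) : ¬ P x := by
  induction hr with
  | base => exact hs
  | step hu hadj hnp ih => exact hnp

theorem reach_subset {g : List (Int × List Int)} {P : Int → Prop} {s x : Int}
    {T : Int → Prop} (hs0 : ¬ P s) (hs : T s)
    (hcl : ∀ u, T u → ¬ P u → ∀ v ∈ adjOf g u, ¬ P v → T v)
    (hr : Reach g P s x) : T x := by
  induction hr with
  | base => exact hs
  | @step u v hu hadj hnp ih => exact hcl u ih (reach_not_P hs0 hu) v hadj hnp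

theorem adj_subset_cands {g : List (Int × List Int)} {u v : Int}
    (h : v ∈ adjOf g u) : v ∈ cands g := by
  unfold adjOf at h
  cases hf : g.find? (fun p => p.1 == u) with
  | none => simp [hf] at h
  | some p =>
    rw [hf] at h
    simp only [Option.map_some, Option.getD_some] at h
    have hp := List.mem_of_find?_eq_some hf
    simp only [cands, List.mem_flatten]
    exact ⟨p.2, List.mem_map.mpr ⟨p, hp, rfl⟩, h⟩

theorem cntA_cons (juegos : List (Int × String)) (tipoJ : String) (a : Int) (l : List Int) :
    cntA juegos tipoJ (a :: l)
      = (if tipoOf juegos a == tipoJ then (1 : Int) else 0) + cntA juegos tipoJ l := by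
  by_cases h : tipoOf juegos a == tipoJ <;>
    simp [cntA, List.filter_cons, h] <;> push_cast <;> ring

theorem cntA_append (juegos : List (Int × String)) (tipoJ : String) (l₁ l₂ : List Int) :
    cntA juegos tipoJ (l₁ ++ l₂) = cntA juegos tipoJ l₁ + cntA juegos tipoJ l₂ := by
  simp [cntA, List.filter_append]

-- adding the distinct new nodes Δ to vis removes at least |Δ| candidate occurrences
theorem filter_not_mem_decrease {Δ cs vis : List Int} (hnd : Δ.Nodup)
    (hsub : ∀ x ∈ Δ, x ∈ cs ∧ x ∉ vis) :
    Δ.length + (cs.filter (fun c => !decide (c ∈ vis ++ Δ))).length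
      ≤ (cs.filter (fun c => !decide (c ∈ vis))).length := by
  have hBA : cs.filter (fun c => !decide (c ∈ vis ++ Δ))
      = (cs.filter (fun c => !decide (c ∈ vis))).filter (fun c => !decide (c ∈ Δ)) := by
    rw [List.filter_filter]
    apply List.filter_congr
    intro c _
    by_cases h1 : c ∈ vis <;> by_cases h2 : c ∈ Δ <;> simp [h1, h2, List.mem_append]
  set A := cs.filter (fun c => !decide (c ∈ vis)) with hA
  have hsplit : A.length = (A.filter (fun c => decide (c ∈ Δ))).length
      + (A.filter (fun c => !decide (c ∈ Δ))).length :=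
    List.length_eq_length_filter_add _
  have hΔle : Δ.length ≤ (A.filter (fun c => decide (c ∈ Δ))).length := by
    have hsub' : Δ ⊆ A.filter (fun c => decide (c ∈ Δ)) := by
      intro x hx
      simp only [hA, List.mem_filter]
      exact ⟨⟨(hsub x hx).1, by simpa using (hsub x hx).2⟩, by simpa using hx⟩
    calc Δ.length = Δ.toFinset.card := (List.toFinset_card_of_nodup hnd).symm
      _ ≤ (A.filter (fun c => decide (c ∈ Δ))).toFinset.card := by
          apply Finset.card_le_card
          intro x hx
          simpa [List.mem_toFinset] using hsub' (by simpa [List.mem_toFinset] using hx)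
      _ ≤ _ := (A.filter (fun c => decide (c ∈ Δ))).toFinset_card_le
  rw [hBA]
  omega

-- the inner for-loop of the BFS: folding one adjacency list
theorem bfs_fold_spec (grafo : List (Int × List Int)) (juegos : List (Int × String))
    (tipoJ : String) (adjs : List Int) :
    ∀ (vis : PySem.Set Int) (rest : List Int) (e : Int),
    ∃ Δ : List Int,
      adjs.foldl
        (fun (st : PySem.Set Int × List Int × Int) adj =>
          if adj ∈ st.1 then st
          else (PySem.Set.add st.1 adj, st.2.1 ++ [adj],
                if tipoOf juegos adj == tipoJ then st.2.2 + 1 else st.2.2))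
        (vis, rest, e)
      = (vis ++ Δ, rest ++ Δ, e + cntA juegos tipoJ Δ)
      ∧ Δ.Nodup ∧ (∀ x ∈ Δ, x ∈ adjs ∧ x ∉ vis) ∧ (∀ a ∈ adjs, a ∈ vis ++ Δ) := by
  induction adjs with
  | nil => intro vis rest e; exact ⟨[], by simp [cntA], by simp, by simp, by simp⟩
  | cons a adjs ih =>
    intro vis rest e
    simp only [List.foldl_cons]
    by_cases ha : a ∈ vis
    · rw [if_pos (by simpa using ha)]
      obtain ⟨Δ, h1, h2, h3, h4⟩ := ih vis rest e
      refine ⟨Δ, h1, h2, fun x hx => ⟨List.mem_cons_of_mem _ (h3 x hx).1, (h3 x hx).2⟩, ?_⟩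
      intro b hb
      rcases List.mem_cons.mp hb with rfl | hb
      · exact List.mem_append_left _ ha
      · exact h4 b hb
    · rw [if_neg (by simpa using ha), PySem.Set.add_of_not_mem ha]
      obtain ⟨Δ, h1, h2, h3, h4⟩ := ih (vis ++ [a]) (rest ++ [a])
        (if tipoOf juegos a == tipoJ then e + 1 else e)
      refine ⟨a :: Δ, ?_, ?_, ?_, ?_⟩
      · rw [h1]
        refine Prod.ext ?_ (Prod.ext ?_ ?_) <;> simp [List.append_assoc, cntA_cons]
        split_ifs <;> ring
      · refine List.nodup_cons.mpr ⟨fun hΔ => ?_, h2⟩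
        exact (h3 a hΔ).2 (List.mem_append_right _ (List.mem_singleton.mpr rfl))
      · intro x hx
        rcases List.mem_cons.mp hx with rfl | hx
        · exact ⟨List.mem_cons_self, ha⟩
        · exact ⟨List.mem_cons_of_mem _ (h3 x hx).1,
            fun hv => (h3 x hx).2 (List.mem_append_left _ hv)⟩
      · intro b hb
        rcases List.mem_cons.mp hb with rfl | hb
        · exact List.mem_append_right _ List.mem_cons_self
        · have := h4 b hb
          simpa [List.append_assoc] using this

-- main BFS lemma: what the queue loop computes, relative to the visited set vis0 before the start
theorem bfsLoop_spec (grafo : List (Int × List Int)) (juegos : List (Int × String))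
    (tipoJ : String) (vis0 : PySem.Set Int) (s : Int) :
    ∀ (fuel : Nat) (cola : List Int) (vis : PySem.Set Int) (e : Int),
    (∀ x ∈ vis0, x ∈ vis) →
    (∀ x ∈ vis, x ∈ vis0 ∨ Reach grafo (· ∈ vis0) s x) →
    (∀ x ∈ cola, x ∈ vis ∧ Reach grafo (· ∈ vis0) s x) →
    (∀ u ∈ vis, u ∉ vis0 → u ∈ cola ∨ ∀ adj ∈ adjOf grafo u, adj ∈ vis) →
    (cola.length + ((cands grafo).filter (fun c => !decide (c ∈ vis))).length < fuel) →
    ∃ added : List Int,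
      bfsLoop grafo juegos tipoJ fuel cola vis e = (vis ++ added, e + cntA juegos tipoJ added)
      ∧ added.Nodup
      ∧ (∀ x ∈ added, Reach grafo (· ∈ vis0) s x ∧ x ∉ vis)
      ∧ (∀ u, u ∈ vis ++ added → u ∉ vis0 → ∀ adj ∈ adjOf grafo u, adj ∈ vis ++ added) := by
  intro fuel
  induction fuel with
  | zero => intro cola vis e _ _ _ _ h4; exact absurd h4 (by omega)
  | succ fuel ih =>
    intro cola vis e h0 h1 h2 h3 h4
    cases cola with
    | nil =>
      refine ⟨[], by simp [bfsLoop, cntA], by simp, by simp, ?_⟩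
      intro u hu hnv adj hadj
      rcases h3 u (by simpa using hu) hnv with h | h
      · simp at h
      · simpa using h adj hadj
    | cons aux rest =>
      obtain ⟨Δ, hfold, hΔnd, hΔ, hadjall⟩ :=
        bfs_fold_spec grafo juegos tipoJ (adjOf grafo aux) vis rest e
      have hstep : bfsLoop grafo juegos tipoJ (fuel + 1) (aux :: rest) vis e
          = bfsLoop grafo juegos tipoJ fuel (rest ++ Δ) (vis ++ Δ) (e + cntA juegos tipoJ Δ) := by
        simp only [bfsLoop, hfold]
      have hRΔ : ∀ x ∈ Δ, Reach grafo (· ∈ vis0) s x := by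
        intro x hx
        exact Reach.step (h2 aux List.mem_cons_self).2 (hΔ x hx).1
          (fun hv => (hΔ x hx).2 (h0 x hv))
      have hdec := filter_not_mem_decrease (cs := cands grafo) (vis := vis) hΔnd
        (fun x hx => ⟨adj_subset_cands (hΔ x hx).1, (hΔ x hx).2⟩)
      obtain ⟨added, ha1, ha2, ha3, ha4⟩ := ih (rest ++ Δ) (vis ++ Δ) (e + cntA juegos tipoJ Δ)
        (fun x hx => List.mem_append_left _ (h0 x hx))
        (by
          intro x hx
          rcases List.mem_append.mp hx with hx | hx
          · exact h1 x hx
          · exact Or.inr (hRΔ x hx))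
        (by
          intro x hx
          rcases List.mem_append.mp hx with hx | hx
          · exact ⟨List.mem_append_left _ (h2 x (List.mem_cons_of_mem _ hx)).1,
              (h2 x (List.mem_cons_of_mem _ hx)).2⟩
          · exact ⟨List.mem_append_right _ hx, hRΔ x hx⟩)
        (by
          intro u hu hnv
          rcases List.mem_append.mp hu with hu | hu
          · rcases h3 u hu hnv with hq | hq
            · rcases List.mem_cons.mp hq with rfl | hq
              · exact Or.inr (fun adj hadj => hadjall adj hadj)
              · exact Or.inl (List.mem_append_left _ hq)
            · exact Or.inr (fun adj hadj => List.mem_append_left _ (hq adj hadj))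
          · exact Or.inl (List.mem_append_right _ hu))
        (by
          simp only [List.length_append, List.length_cons] at h4 hdec ⊢
          omega)
      refine ⟨Δ ++ added, ?_, ?_, ?_, ?_⟩
      · rw [hstep, ha1]
        refine Prod.ext (by simp [List.append_assoc]) (by simp [cntA_append]; ring)
      · refine List.nodup_append.mpr ⟨hΔnd, ha2, ?_⟩
        intro x hx y hy
        intro hxy
        subst hxy
        exact (ha3 x hy).2 (List.mem_append_right _ hx)
      · intro x hx
        rcases List.mem_append.mp hx with hx | hx
        · exact ⟨hRΔ x hx, (hΔ x hx).2⟩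
        · exact ⟨(ha3 x hx).1, fun hv => (ha3 x hx).2 (List.mem_append_left _ hv)⟩
      · intro u hu hnv adj hadj
        have hu' : u ∈ (vis ++ Δ) ++ added := by simpa [List.append_assoc] using hu
        have := ha4 u hu' hnv adj hadj
        simpa [List.append_assoc] using this

theorem cands_length (grafo : List (Int × List Int)) :
    (cands grafo).length = (grafo.map (fun p => p.2.length)).sum := by
  simp [cands, List.length_flatten, List.map_map, Function.comp_def]

-- per-component corollary for A
theorem recorrido_spec (grafo : List (Int × List Int)) (juegos : List (Int × String))
    (tipoJ : String) (vis0 : PySem.Set Int) (s : Int) (hs : s ∉ vis0) :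
    ∃ added : List Int,
      recorridoanchura s grafo vis0 juegos tipoJ
        = (vis0 ++ s :: added, 1 + cntA juegos tipoJ added)
      ∧ (s :: added).Nodup
      ∧ (∀ x, x ∈ s :: added ↔ Reach grafo (· ∈ vis0) s x)
      ∧ (∀ x ∈ added, x ∉ vis0 ∧ x ≠ s) := by
  have hadd : PySem.Set.add vis0 s = vis0 ++ [s] := PySem.Set.add_of_not_mem hs
  have hfuel : ([s].length
      + ((cands grafo).filter (fun c => !decide (c ∈ vis0 ++ [s]))).length) < fuelOf grafo := by
    have h1 := List.length_filter_le (fun c => !decide (c ∈ vis0 ++ [s])) (cands grafo)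
    have h2 := cands_length grafo
    simp only [fuelOf, List.length_cons, List.length_nil]
    omega
  obtain ⟨added, h1, h2, h3, h4⟩ := bfsLoop_spec grafo juegos tipoJ vis0 s (fuelOf grafo)
    [s] (vis0 ++ [s]) 1
    (fun x hx => List.mem_append_left _ hx)
    (by
      intro x hx
      rcases List.mem_append.mp hx with hx | hx
      · exact Or.inl hx
      · rcases List.mem_singleton.mp hx with rfl
        exact Or.inr Reach.base)
    (by
      intro x hx
      rcases List.mem_singleton.mp hx with rfl
      exact ⟨List.mem_append_right _ List.mem_cons_self, Reach.base⟩)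
    (by
      intro u hu hnv
      rcases List.mem_append.mp hu with hu | hu
      · exact absurd hu hnv
      · exact Or.inl hu)
    hfuel
  have hR0 : ∀ x ∈ added, x ∉ vis0 ∧ x ≠ s := by
    intro x hx
    refine ⟨fun hv => (h3 x hx).2 (List.mem_append_left _ hv),
      fun he => (h3 x hx).2 (List.mem_append_right _ (by simp [he]))⟩
  refine ⟨added, ?_, ?_, ?_, hR0⟩
  · rw [recorridoanchura, hadd, h1]
    refine Prod.ext (by simp [List.append_assoc]) (by simp)
  · exact List.nodup_cons.mpr ⟨fun hsΔ => (hR0 s hsΔ).2 rfl, h2⟩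
  · intro x
    constructor
    · intro hx
      rcases List.mem_cons.mp hx with rfl | hx
      · exact Reach.base
      · exact (h3 x hx).1
    · intro hr
      have hT : x ∈ (vis0 ++ [s]) ++ added := by
        refine reach_subset (P := (· ∈ vis0)) hs ?_ ?_ hr
        · exact List.mem_append_left _ (List.mem_append_right _ List.mem_cons_self)
        · intro u hu hnu v hv _
          exact h4 u hu hnu v hv
      have hnx : x ∉ vis0 := reach_not_P hs hr
      rcases List.mem_append.mp hT with hT | hT
      · rcases List.mem_append.mp hT with hT | hT
        · exact absurd hT hnx
        · rcases List.mem_singleton.mp hT with rfl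
          exact List.mem_cons_self
      · exact List.mem_cons_of_mem _ hT

-- membership in B's 'nuevos'
theorem mem_nuevosOf {g : List (Int × List Int)} {vis comp : PySem.Set Int} {x : Int} :
    x ∈ nuevosOf g vis comp ↔ (∃ u ∈ comp, x ∈ adjOf g u) ∧ x ∉ vis ∧ x ∉ comp := by
  simp only [nuevosOf, PySem.Set.mem_diff, PySem.Set.mem_ofList, List.mem_flatMap]
  tauto

theorem nodup_nuevosOf (g : List (Int × List Int)) (vis comp : PySem.Set Int) :
    (nuevosOf g vis comp).Nodup :=
  PySem.Set.nodup_diff _ _ (PySem.Set.nodup_diff _ _ (PySem.Set.nodup_ofList _))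

-- main saturation lemma for B
theorem satLoop_spec (grafo : List (Int × List Int)) (vis0 : PySem.Set Int) (s : Int)
    (hP : s ∉ vis0) :
    ∀ (fuel : Nat) (comp : PySem.Set Int),
    s ∈ comp →
    (∀ x ∈ comp, Reach grafo (· ∈ vis0) s x) →
    comp.Nodup →
    (((cands grafo).filter (fun c => !decide (c ∈ comp))).length < fuel) →
    (satLoop grafo vis0 fuel comp).Nodup ∧
    (∀ x, x ∈ satLoop grafo vis0 fuel comp ↔ Reach grafo (· ∈ vis0) s x) := by
  intro fuel
  induction fuel with
  | zero => intro comp _ _ _ h4; exact absurd h4 (by omega)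
  | succ fuel ih =>
    intro comp hc1 hc2 hc3 hc4
    by_cases he : (nuevosOf grafo vis0 comp).isEmpty
    · have hret : satLoop grafo vis0 (fuel + 1) comp = comp := by
        simp only [satLoop, he, if_pos]
      rw [hret]
      have hnone : ∀ x, x ∉ nuevosOf grafo vis0 comp := by
        intro x hx
        rw [List.isEmpty_iff.mp he] at hx
        simp at hx
      refine ⟨hc3, fun x => ⟨hc2 x, ?_⟩⟩
      intro hr
      refine reach_subset (P := (· ∈ vis0)) hP hc1 ?_ hr
      intro u hu _ v hv hnv
      by_cases hvc : v ∈ comp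
      · exact hvc
      · exact absurd (mem_nuevosOf.mpr ⟨⟨u, hu, hv⟩, hnv, hvc⟩) (hnone v)
    · have hrec : satLoop grafo vis0 (fuel + 1) comp
          = satLoop grafo vis0 fuel
              (PySem.Set.union comp (nuevosOf grafo vis0 comp)) := by
        simp only [satLoop]
        rw [if_neg he]
      rw [hrec]
      have hmemU : ∀ x : Int,
          x ∈ PySem.Set.union comp (nuevosOf grafo vis0 comp)
            ↔ x ∈ comp ∨ x ∈ nuevosOf grafo vis0 comp :=
        fun x => PySem.Set.mem_union comp (nuevosOf grafo vis0 comp) x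
      have hndU : (PySem.Set.union comp (nuevosOf grafo vis0 comp)).Nodup :=
        PySem.Set.nodup_union comp (nuevosOf grafo vis0 comp) hc3
      have hRnew : ∀ x ∈ nuevosOf grafo vis0 comp, Reach grafo (· ∈ vis0) s x := by
        intro x hx
        obtain ⟨⟨u, hu, hadj⟩, hnvis, _⟩ := mem_nuevosOf.mp hx
        exact Reach.step (hc2 u hu) hadj hnvis
      have hfilter : ((cands grafo).filter
            (fun c => !decide (c ∈ PySem.Set.union comp (nuevosOf grafo vis0 comp)))).length
          = ((cands grafo).filter
            (fun c => !decide (c ∈ comp ++ nuevosOf grafo vis0 comp))).length := by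
        congr 1
        apply List.filter_congr
        intro c _
        have hiff : c ∈ PySem.Set.union comp (nuevosOf grafo vis0 comp)
            ↔ c ∈ comp ++ nuevosOf grafo vis0 comp := by
          rw [hmemU c, List.mem_append]
        exact congrArg (fun b => !b) (decide_eq_decide.mpr hiff)
      have hne : nuevosOf grafo vis0 comp ≠ [] := fun hn => he (by rw [hn]; rfl)
      have hlen : 0 < (nuevosOf grafo vis0 comp).length := List.length_pos_of_ne_nil hne
      have hsub : ∀ x ∈ nuevosOf grafo vis0 comp, x ∈ cands grafo ∧ x ∉ comp := by
        intro x hx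
        obtain ⟨⟨u, hu, hadj⟩, _, hnc⟩ := mem_nuevosOf.mp hx
        exact ⟨adj_subset_cands hadj, hnc⟩
      have hdec := filter_not_mem_decrease (cs := cands grafo) (vis := comp)
        (nodup_nuevosOf grafo vis0 comp) hsub
      exact ih (PySem.Set.union comp (nuevosOf grafo vis0 comp))
        ((hmemU s).mpr (Or.inl hc1))
        (fun x hx => ((hmemU x).mp hx).elim (hc2 x) (hRnew x))
        hndU
        (by rw [hfilter]; omega)

theorem sum_ite_eq_cntA (juegos : List (Int × String)) (tipoJ : String) (s : Int) :
    ∀ l : List Int, s ∉ l →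
    (l.map (fun v => if v ≠ s ∧ tipoOf juegos v = tipoJ then (1 : Int) else 0)).sum
      = cntA juegos tipoJ l := by
  intro l
  induction l with
  | nil => intro _; simp [cntA]
  | cons a l ih =>
    intro hs
    have hane : a ≠ s := fun h => hs (by simp [h])
    have hs' : s ∉ l := fun h => hs (List.mem_cons_of_mem _ h)
    rw [List.map_cons, List.sum_cons, cntA_cons, ih hs']
    by_cases hat : tipoOf juegos a = tipoJ <;> simp [hat, hane]

-- counts agree: B counts over the finished component what A counted incrementally
theorem compCount_eq (juegos : List (Int × String)) (tipoJ : String) (s : Int)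
    (added : List Int) (comp : PySem.Set Int)
    (hnd : (s :: added).Nodup) (hnc : comp.Nodup)
    (hmem : ∀ x, x ∈ comp ↔ x ∈ s :: added) :
    compCount juegos tipoJ s comp = 1 + cntA juegos tipoJ added := by
  have hperm : comp.Perm (s :: added) := (List.perm_ext_iff_of_nodup hnc hnd).mpr hmem
  have hns : s ∉ added := (List.nodup_cons.mp hnd).1
  have h1 := (hperm.map (fun v => if v ≠ s ∧ tipoOf juegos v = tipoJ then (1 : Int) else 0)).sum_eq
  rw [compCount, h1, List.map_cons, List.sum_cons, sum_ite_eq_cntA juegos tipoJ s added hns]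
  simp

-- the simulation relation between A's and B's outer fold states
def SimRel (stA : Int × Int × PySem.Set Int) (stB : PySem.Set Int × List Int) : Prop :=
  (∀ x, x ∈ stA.2.2 ↔ x ∈ stB.1) ∧ stA.2.2.Nodup ∧ stB.1.Nodup ∧
  stA.1 = (stB.2.length : Int) ∧ (∀ c ∈ stB.2, 1 ≤ c) ∧
  stA.2.1 = stB.2.foldl (fun a c => if c > a then c else a) 0

theorem outer_sim (grafo : List (Int × List Int)) (juegos : List (Int × String))
    (tipoJ : String) (l : List Int) :
    ∀ (stA : Int × Int × PySem.Set Int) (stB : PySem.Set Int × List Int),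
    SimRel stA stB →
    SimRel (l.foldl
          (fun (st : Int × Int × PySem.Set Int) juego =>
            if juego ∈ st.2.2 then st
            else
              let r := recorridoanchura juego grafo st.2.2 juegos tipoJ
              (st.1 + 1, if r.2 > st.2.1 then r.2 else st.2.1, r.1)) stA)
        (l.foldl
          (fun (st : PySem.Set Int × List Int) juego =>
            if juego ∈ st.1 then st
            else
              let comp := satLoop grafo st.1 (fuelOf grafo) (PySem.Set.add PySem.Set.empty juego)
              (PySem.Set.union st.1 comp, st.2 ++ [compCount juegos tipoJ juego comp])) stB) := by
  induction l with
  | nil => intro stA stB h; simpa using h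
  | cons j l ih =>
    intro stA stB h
    obtain ⟨hmem, hndA, hndB, hop, hpos, hjc⟩ := h
    simp only [List.foldl_cons]
    by_cases hj : j ∈ stA.2.2
    · rw [if_pos hj, if_pos ((hmem j).mp hj)]
      exact ih stA stB ⟨hmem, hndA, hndB, hop, hpos, hjc⟩
    · have hjB : j ∉ stB.1 := fun hb => hj ((hmem j).mpr hb)
      rw [if_neg hj, if_neg hjB]
      obtain ⟨added, hr1, hr2, hr3, hr4⟩ := recorrido_spec grafo juegos tipoJ stA.2.2 j hj
      have hr1' : (recorridoanchura j grafo stA.2.2 juegos tipoJ).1 = stA.2.2 ++ j :: added := by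
        rw [hr1]
      have hr2' : (recorridoanchura j grafo stA.2.2 juegos tipoJ).2 = 1 + cntA juegos tipoJ added := by
        rw [hr1]
      have hAdd : PySem.Set.add PySem.Set.empty j = [j] := by
        rw [PySem.Set.add_of_not_mem (by simp [PySem.Set.empty])]
        simp [PySem.Set.empty]
      obtain ⟨hndC, hmemC⟩ := satLoop_spec grafo stB.1 j hjB (fuelOf grafo)
        (PySem.Set.add PySem.Set.empty j)
        (by rw [hAdd]; exact List.mem_singleton.mpr rfl)
        (by
          rw [hAdd]
          intro x hx
          rcases List.mem_singleton.mp hx with rfl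
          exact Reach.base)
        (by rw [hAdd]; simp)
        (by
          have h1 := List.length_filter_le
            (fun c => !decide (c ∈ PySem.Set.add PySem.Set.empty j)) (cands grafo)
          have h2 := cands_length grafo
          simp only [fuelOf]
          omega)
      have hmemC' : ∀ x, x ∈ satLoop grafo stB.1 (fuelOf grafo) (PySem.Set.add PySem.Set.empty j)
          ↔ Reach grafo (· ∈ stA.2.2) j x := by
        intro x
        rw [hmemC x]
        exact ⟨reach_congr (fun y => ⟨fun hy => (hmem y).mpr hy, fun hy => (hmem y).mp hy⟩),
          reach_congr (fun y => hmem y)⟩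
      have hmemCs : ∀ x, x ∈ satLoop grafo stB.1 (fuelOf grafo) (PySem.Set.add PySem.Set.empty j)
          ↔ x ∈ j :: added := fun x => (hmemC' x).trans (hr3 x).symm
      have hcc : compCount juegos tipoJ j
            (satLoop grafo stB.1 (fuelOf grafo) (PySem.Set.add PySem.Set.empty j))
          = 1 + cntA juegos tipoJ added :=
        compCount_eq juegos tipoJ j added _ hr2 hndC hmemCs
      apply ih
      refine ⟨?_, ?_, ?_, ?_, ?_, ?_⟩
      · intro x
        show x ∈ (recorridoanchura j grafo stA.2.2 juegos tipoJ).1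
          ↔ x ∈ PySem.Set.union stB.1
              (satLoop grafo stB.1 (fuelOf grafo) (PySem.Set.add PySem.Set.empty j))
        rw [hr1', List.mem_append, PySem.Set.mem_union]
        constructor
        · rintro (hx | hx)
          · exact Or.inl ((hmem x).mp hx)
          · exact Or.inr ((hmemCs x).mpr hx)
        · rintro (hx | hx)
          · exact Or.inl ((hmem x).mpr hx)
          · exact Or.inr ((hmemCs x).mp hx)
      · show ((recorridoanchura j grafo stA.2.2 juegos tipoJ).1).Nodup
        rw [hr1']
        refine List.nodup_append.mpr ⟨hndA, hr2, ?_⟩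
        intro x hx y hy
        intro hxy
        subst hxy
        exact reach_not_P hj ((hr3 x).mp hy) hx
      · show (PySem.Set.union stB.1
            (satLoop grafo stB.1 (fuelOf grafo) (PySem.Set.add PySem.Set.empty j))).Nodup
        exact PySem.Set.nodup_union _ _ hndB
      · show stA.1 + 1 = _
        simp only [List.length_append, List.length_cons, List.length_nil]
        omega
      · intro c hc
        rcases List.mem_append.mp hc with hc | hc
        · exact hpos c hc
        · rcases List.mem_singleton.mp hc with rfl
          rw [hcc]
          unfold cntA
          omega
      · show (if (recorridoanchura j grafo stA.2.2 juegos tipoJ).2 > stA.2.1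
            then (recorridoanchura j grafo stA.2.2 juegos tipoJ).2 else stA.2.1) = _
        rw [List.foldl_append]
        simp only [List.foldl_cons, List.foldl_nil]
        rw [hr2', hcc, hjc]

theorem foldl_ite_max (cs : List Int) :
    ∀ a : Int, cs.foldl (fun a c => if c > a then c else a) a = cs.foldl max a := by
  induction cs with
  | nil => intro a; rfl
  | cons c cs ih =>
    intro a
    simp only [List.foldl_cons]
    rw [ih]
    congr 1
    rw [max_def]
    split_ifs <;> omega


theorem final_eq (stA : Int × Int × PySem.Set Int) (stB : PySem.Set Int × List Int)
    (h : SimRel stA stB) :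
    (stA.1, stA.2.1)
      = ((stB.2.length : Int), match stB.2 with | [] => 0 | c :: cs => cs.foldl max c) := by
  obtain ⟨vis, counts⟩ := stB
  obtain ⟨-, -, -, h4, h5, h6⟩ := h
  cases counts with
  | nil => exact Prod.ext (by simpa using h4) (by simpa using h6)
  | cons c cs =>
    have h6' : stA.2.1 = cs.foldl max c := by
      rw [h6]
      simp only [List.foldl_cons]
      rw [foldl_ite_max]
      congr 1
      have := h5 c List.mem_cons_self
      split_ifs <;> omega
    exact Prod.ext (by simpa using h4) (by simpa using h6')

-- ===== VERDICT (by name: the statement is the Claim_ definition above) =====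
theorem metodo_spec : Claim_equal_metodo := by
  intro grafo juegos nJuegos tipoJ _ _
  show metodo grafo juegos nJuegos tipoJ = metodo_alt grafo juegos nJuegos tipoJ
  exact final_eq _ _ (outer_sim grafo juegos tipoJ (PySem.List.pyRange 0 nJuegos 1)
    (0, 0, PySem.Set.empty) (PySem.Set.empty, [])
    ⟨fun x => Iff.rfl, List.nodup_nil, List.nodup_nil, by simp, by simp, rfl⟩)
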